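-- pv_equiv track=rewrite | github.com/AbeWolthuis/CounterpointConsensus | src/merge_python_files.py | extract_top_level_classes
-- ===== SOURCE A (Python) =====
-- def extract_top_level_classes(lines):
--     """
--     Extract all top-level class definitions. For each class, capture until next
--     top-level 'class' or 'def' or EOF. Return (class_blocks, remainder).
--     """
--     class_blocks = []
--     remainder = []
--     in_class = False
--     current_class = []
--
--     def start_new_class(line):
--         return line.strip().startswith("class ") and line.lstrip() == line
--
--     def start_new_def(line):
--         return line.strip().startswith("def ") and line.lstrip() == line
--
--     idx = 0
--     n = len(lines)
--     while idx < n: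
--         line = lines[idx]
--         if not in_class:
--             if start_new_class(line):
--                 in_class = True
--                 current_class = [line]
--             else:
--                 remainder.append(line)
--         else:
--             # we are inside a class block
--             if start_new_class(line) or start_new_def(line):
--                 # close current class
--                 class_blocks.append(current_class)
--                 current_class = []
--                 in_class = False
--                 # re-check this line next iteration
--                 idx -= 1
--             else:
--                 current_class.append(line)
--         idx += 1
--
--     if in_class and current_class:
--         class_blocks.append(current_class)
--
--     return class_blocks, remainder
-- ===== SOURCE B (Python) =====
-- def extract_top_level_classes(lines):
--     """
--     Split lines into chunks that start at each top-level 'class'/'def' line,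
--     then classify whole chunks: class-headed chunks become class_blocks,
--     everything else (leading prefix and def-headed chunks) is the remainder.
--     """
--     def boundary(l):
--         return l.lstrip() == l and (l.strip().startswith("class ")
--                                     or l.strip().startswith("def "))
--
--     k = 0
--     while k < len(lines) and not boundary(lines[k]):
--         k += 1
--     pre, rest = lines[:k], lines[k:]
--
--     chunks = []
--     while rest:                      # rest always starts with a boundary line
--         body = []
--         for l in rest[1:]:
--             if boundary(l):
--                 break
--             body.append(l)
--         chunk = [rest[0]] + body
--         chunks.append(chunk)
--         rest = rest[len(chunk):]
--
--     class_blocks = [c for c in chunks if c[0].strip().startswith("class ")]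
--     remainder = pre + [l for c in chunks
--                        if not c[0].strip().startswith("class ") for l in c]
--     return class_blocks, remainder
-- ===== Notes on version B (the rewrite author's own statement) =====
-- stated objective: alternative
-- what changed: Replaces A's stateful in_class scan (with index back-tracking to re-process boundary lines) by a split-then-classify decomposition: first cut the lines into the non-boundary prefix plus chunks each starting at a top-level class/def line, then take class-headed chunks as class_blocks and concatenate the rest as the remainder.
import Mathlib
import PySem

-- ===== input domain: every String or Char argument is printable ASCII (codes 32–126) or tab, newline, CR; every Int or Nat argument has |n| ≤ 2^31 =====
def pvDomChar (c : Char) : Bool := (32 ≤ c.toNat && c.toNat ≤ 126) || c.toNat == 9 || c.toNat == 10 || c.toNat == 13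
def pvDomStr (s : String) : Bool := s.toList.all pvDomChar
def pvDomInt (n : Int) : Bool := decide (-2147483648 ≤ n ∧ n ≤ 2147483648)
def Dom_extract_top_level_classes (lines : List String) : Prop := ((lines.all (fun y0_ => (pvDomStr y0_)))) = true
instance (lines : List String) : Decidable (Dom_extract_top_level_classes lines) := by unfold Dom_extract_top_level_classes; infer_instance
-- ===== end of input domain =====

-- B splits the lines into boundary-started chunks and classifies whole chunks, instead of A's
-- stateful in_class scan; objective: alternative decomposition (same return value, similar cost).


-- ===== PORT A =====
def startNewClass (line : String) : Bool :=
  PySem.Str.startswith (PySem.Str.strip line) "class " && (PySem.Str.lstrip line == line)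

def startNewDef (line : String) : Bool :=
  PySem.Str.startswith (PySem.Str.strip line) "def " && (PySem.Str.lstrip line == line)

-- A's while loop; the Python `idx -= 1` followed by `idx += 1` on closing a class block is the
-- re-processing of the same index with in_class = False, transcribed as the recursive call with
-- the same idx.
def aLoop (lines : List String) (idx : Nat) (in_class : Bool)
    (current : List String) (blocks : List (List String)) (rem : List String) :
    List (List String) × List String :=
  if h : idx < lines.length then
    let line := lines[idx]
    if !in_class then
      if startNewClass line then
        aLoop lines (idx+1) true [line] blocks rem
      else
        aLoop lines (idx+1) false current blocks (rem ++ [line])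
    else
      if startNewClass line || startNewDef line then
        aLoop lines idx false [] (blocks ++ [current]) rem
      else
        aLoop lines (idx+1) true (current ++ [line]) blocks rem
  else
    if in_class && !current.isEmpty then (blocks ++ [current], rem) else (blocks, rem)
termination_by (lines.length - idx) * 2 + (if in_class then 1 else 0)
decreasing_by all_goals (simp_all; try omega)

def extract_top_level_classes (lines : List String) : List (List String) × List String :=
  aLoop lines 0 false [] [] []

-- ===== PORT B =====
def isBoundary (l : String) : Bool :=
  (PySem.Str.lstrip l == l) &&
    (PySem.Str.startswith (PySem.Str.strip l) "class " ||
     PySem.Str.startswith (PySem.Str.strip l) "def ")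

-- chunk = first line plus following non-boundary lines; loop until rest is empty
def splitChunks (rest : List String) : List (List String) :=
  match rest with
  | [] => []
  | h :: t =>
    let body := t.takeWhile (fun l => !isBoundary l)
    let chunk := h :: body
    chunk :: splitChunks ((h :: t).drop chunk.length)
termination_by rest.length
decreasing_by simp

def headIsClass (c : List String) : Bool :=
  match c with
  | [] => false      -- unreachable: every chunk is nonempty
  | h :: _ => PySem.Str.startswith (PySem.Str.strip h) "class "

def extract_top_level_classes_alt (lines : List String) : List (List String) × List String :=
  let pre := lines.takeWhile (fun l => !isBoundary l)
  let rest := lines.dropWhile (fun l => !isBoundary l)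
  let chunks := splitChunks rest
  let class_blocks := chunks.filter headIsClass
  let remainder := pre ++ (chunks.filter (fun c => !headIsClass c)).flatMap id
  (class_blocks, remainder)

-- ===== PRECONDITION & SPEC =====
def Spec_extract_top_level_classes (lines : List String) (out : List (List String) × List String) : Prop := out = extract_top_level_classes_alt lines
instance (lines : List String) (out : List (List String) × List String) : Decidable (Spec_extract_top_level_classes lines out) := by unfold Spec_extract_top_level_classes; infer_instance

-- ===== CLAIM (what is proved, stated in full; the proofs are below) =====
def Claim_equal_extract_top_level_classes : Prop := ∀ (lines : List String), Dom_extract_top_level_classes lines → Spec_extract_top_level_classes lines (extract_top_level_classes lines)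

-- ===== LEMMAS AND PROOFS =====

lemma isBoundary_eq (l : String) : isBoundary l = (startNewClass l || startNewDef l) := by
  unfold isBoundary startNewClass startNewDef
  cases (PySem.Str.lstrip l == l) <;>
    cases (PySem.Str.startswith (PySem.Str.strip l) "class ") <;>
    cases (PySem.Str.startswith (PySem.Str.strip l) "def ") <;> simp

lemma takeWhile_dropWhile_nil (p : String → Bool) (xs : List String) :
    (xs.dropWhile p).takeWhile p = [] := by
  induction xs with
  | nil => simp
  | cons h t ih => by_cases hp : p h <;> simp [hp, ih]

lemma drop_length_takeWhile (p : String → Bool) (xs : List String) :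
    xs.drop (xs.takeWhile p).length = xs.dropWhile p := by
  induction xs with
  | nil => simp
  | cons h t ih => by_cases hp : p h <;> simp [hp, ih]

lemma splitChunks_nil : splitChunks [] = [] := by rw [splitChunks]

lemma splitChunks_cons (l : String) (xs : List String) :
    splitChunks (l :: xs) =
      (l :: xs.takeWhile (fun s => !isBoundary s)) ::
        splitChunks (xs.dropWhile (fun s => !isBoundary s)) := by
  rw [splitChunks]
  simp [drop_length_takeWhile]

lemma alt_nil : extract_top_level_classes_alt [] = ([], []) := by
  simp [extract_top_level_classes_alt, splitChunks_nil]

-- the leading non-boundary prefix all goes to the remainder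
lemma alt_decomp (xs : List String) :
    extract_top_level_classes_alt xs =
      ((extract_top_level_classes_alt (xs.dropWhile (fun l => !isBoundary l))).1,
       xs.takeWhile (fun l => !isBoundary l) ++
         (extract_top_level_classes_alt (xs.dropWhile (fun l => !isBoundary l))).2) := by
  unfold extract_top_level_classes_alt
  simp [takeWhile_dropWhile_nil, List.dropWhile_idempotent]

lemma alt_cons_not (l : String) (xs : List String) (hb : isBoundary l = false) :
    extract_top_level_classes_alt (l :: xs) =
      ((extract_top_level_classes_alt xs).1, l :: (extract_top_level_classes_alt xs).2) := by
  unfold extract_top_level_classes_alt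
  simp [hb]

lemma headIsClass_cons (h : String) (t : List String) :
    headIsClass (h :: t) = PySem.Str.startswith (PySem.Str.strip h) "class " := rfl

lemma alt_cons_b (l : String) (xs : List String) (hb : isBoundary l = true) :
    extract_top_level_classes_alt (l :: xs) =
      (if PySem.Str.startswith (PySem.Str.strip l) "class " then
        ((l :: xs.takeWhile (fun s => !isBoundary s)) ::
            (extract_top_level_classes_alt (xs.dropWhile (fun s => !isBoundary s))).1,
         (extract_top_level_classes_alt (xs.dropWhile (fun s => !isBoundary s))).2)
      else
        ((extract_top_level_classes_alt (xs.dropWhile (fun s => !isBoundary s))).1,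
         (l :: xs.takeWhile (fun s => !isBoundary s)) ++
           (extract_top_level_classes_alt (xs.dropWhile (fun s => !isBoundary s))).2)) := by
  have h1 : (extract_top_level_classes_alt (xs.dropWhile (fun s => !isBoundary s))).1 =
      (splitChunks (xs.dropWhile (fun s => !isBoundary s))).filter headIsClass := by
    unfold extract_top_level_classes_alt
    simp [List.dropWhile_idempotent]
  have h2 : (extract_top_level_classes_alt (xs.dropWhile (fun s => !isBoundary s))).2 =
      ((splitChunks (xs.dropWhile (fun s => !isBoundary s))).filter (fun c => !headIsClass c)).flatMap id := by
    unfold extract_top_level_classes_alt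
    simp [takeWhile_dropWhile_nil, List.dropWhile_idempotent]
  conv_lhs => unfold extract_top_level_classes_alt
  simp only [List.takeWhile_cons, List.dropWhile_cons, hb, Bool.not_true, if_neg Bool.false_ne_true]
  rw [splitChunks_cons]
  by_cases hcl : PySem.Str.startswith (PySem.Str.strip l) "class " <;>
    simp only [List.filter_cons, headIsClass_cons, hcl, h1, h2] <;> simp

lemma aLoop_inv (lines : List String) (idx : Nat) (in_class : Bool)
    (current : List String) (blocks : List (List String)) (rem : List String) :
    (in_class = true → current ≠ []) →
    aLoop lines idx in_class current blocks rem =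
      if in_class then
        (blocks ++ (current ++ (lines.drop idx).takeWhile (fun l => !isBoundary l)) ::
            (extract_top_level_classes_alt ((lines.drop idx).dropWhile (fun l => !isBoundary l))).1,
         rem ++ (extract_top_level_classes_alt ((lines.drop idx).dropWhile (fun l => !isBoundary l))).2)
      else
        (blocks ++ (extract_top_level_classes_alt (lines.drop idx)).1,
         rem ++ (extract_top_level_classes_alt (lines.drop idx)).2) := by
  induction idx, in_class, current, blocks, rem using aLoop.induct (lines := lines) with
  | case1 idx in_class current blocks rem h line hni hcl ih =>
    intro hc
    have hline : line = lines[idx] := rfl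
    simp only [hline] at ih
    replace hcl : startNewClass lines[idx] = true := hcl
    simp at hni
    subst hni
    rw [aLoop]
    simp only [h, dif_pos, Bool.not_false, if_pos, hcl]
    rw [ih (by simp)]
    have hb : isBoundary lines[idx] = true := by rw [isBoundary_eq]; simp [hcl]
    have hclass : PySem.Str.startswith (PySem.Str.strip lines[idx]) "class " = true := by
      have := hcl; unfold startNewClass at this; exact (Bool.and_eq_true_iff.mp this).1
    rw [List.drop_eq_getElem_cons h, alt_cons_b _ _ hb, if_pos hclass]
    simp
  | case2 idx in_class current blocks rem h line hni hcl ih =>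
    intro hc
    have hline : line = lines[idx] := rfl
    simp only [hline] at ih
    replace hcl : ¬ startNewClass lines[idx] = true := hcl
    simp at hni
    subst hni
    rw [aLoop]
    simp only [h, dif_pos, Bool.not_false, if_true, hcl]
    rw [ih (by simp)]
    simp only [Bool.false_eq_true, ite_false]
    rw [List.drop_eq_getElem_cons h]
    by_cases hd : startNewDef lines[idx]
    · have hb : isBoundary lines[idx] = true := by rw [isBoundary_eq]; simp [hd]
      have hclass : PySem.Str.startswith (PySem.Str.strip lines[idx]) "class " = false := by
        have hl : (PySem.Str.lstrip lines[idx] == lines[idx]) = true := by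
          unfold startNewDef at hd; exact (Bool.and_eq_true_iff.mp hd).2
        by_contra hcc
        apply hcl
        unfold startNewClass
        simp at hcc
        simp [hcc, hl]
      rw [alt_cons_b _ _ hb, if_neg (by simpa using hclass), alt_decomp (lines.drop (idx + 1))]
      simp
    · have hb : isBoundary lines[idx] = false := by
        rw [isBoundary_eq]
        simp only [Bool.or_eq_false_iff]
        exact ⟨by simpa using hcl, by simpa using hd⟩
      rw [alt_cons_not _ _ hb]
      simp
  | case3 idx in_class current blocks rem h line hni hcl ih =>
    intro hc
    replace hcl : (startNewClass lines[idx] || startNewDef lines[idx]) = true := hcl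
    simp at hni
    subst hni
    rw [aLoop]
    simp only [h, dif_pos, Bool.not_true, Bool.false_eq_true, ite_false, hcl]
    rw [ih (by simp)]
    have hb : isBoundary lines[idx] = true := by rw [isBoundary_eq]; exact hcl
    have hcons := List.drop_eq_getElem_cons h
    have htw : (lines.drop idx).takeWhile (fun l => !isBoundary l) = [] := by
      rw [hcons]; simp [hb]
    have hdw : (lines.drop idx).dropWhile (fun l => !isBoundary l) = lines.drop idx := by
      rw [hcons]; simp [hb]
    simp [htw, hdw]
  | case4 idx in_class current blocks rem h line hni hcl ih =>
    intro hc
    have hline : line = lines[idx] := rfl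
    simp only [hline] at ih
    replace hcl : ¬ (startNewClass lines[idx] || startNewDef lines[idx]) = true := hcl
    simp at hni
    subst hni
    rw [aLoop]
    simp only [h, dif_pos, Bool.not_true, Bool.false_eq_true, ite_false, hcl]
    rw [ih (by simp)]
    have hb : isBoundary lines[idx] = false := by rw [isBoundary_eq]; simpa using hcl
    have hcons := List.drop_eq_getElem_cons h
    have htw : (lines.drop idx).takeWhile (fun l => !isBoundary l) =
        lines[idx] :: (lines.drop (idx + 1)).takeWhile (fun l => !isBoundary l) := by
      rw [hcons, List.takeWhile_cons]; simp [hb]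
    have hdw : (lines.drop idx).dropWhile (fun l => !isBoundary l) =
        (lines.drop (idx + 1)).dropWhile (fun l => !isBoundary l) := by
      rw [hcons, List.dropWhile_cons]; simp [hb]
    simp [htw, hdw]
  | case5 idx in_class current blocks rem h hcond =>
    intro hc
    rw [aLoop]
    simp only [h, hcond, if_true]
    obtain ⟨h1, h2⟩ := Bool.and_eq_true_iff.mp hcond
    subst h1
    have hdrop : lines.drop idx = [] := List.drop_eq_nil_of_le (by omega)
    simp [hdrop, alt_nil]
  | case6 idx in_class current blocks rem h hcond =>
    intro hc
    rw [aLoop]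
    simp only [h, hcond]
    have hdrop : lines.drop idx = [] := List.drop_eq_nil_of_le (by omega)
    cases in_class with
    | false => simp [hdrop, alt_nil]
    | true =>
      exfalso
      apply hcond
      simp [hc rfl]

-- ===== VERDICT (by name: the statement is the Claim_ definition above) =====
theorem extract_top_level_classes_spec : Claim_equal_extract_top_level_classes := by
  intro lines _
  unfold Spec_extract_top_level_classes extract_top_level_classes
  simpa using aLoop_inv lines 0 false [] [] [] (by simp)
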